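-- pv_equiv track=rewrite | github.com/Srujan-pd/RAG-chat-bot | rag_engine.py | is_greeting
-- ===== SOURCE A (Python) =====
-- def is_greeting(question):
--     """Check if the question is a greeting"""
--     greetings = [
--         'hello', 'hi', 'hey', 'good morning', 'good afternoon',
--         'good evening', 'greetings', 'howdy', 'hola', 'namaste',
--         'hi there', 'hello there'
--     ]
--     question_lower = question.lower().strip()
--
--     # Check for exact matches or greeting at the start of the message
--     for greeting in greetings:
--         if question_lower == greeting or question_lower.startswith(greeting + ' ') or question_lower.startswith(greeting + ','):
--             return True
--
--     return False
-- ===== SOURCE B (Python) =====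
-- GREETINGS = frozenset([
--     'hello', 'hi', 'hey', 'good morning', 'good afternoon',
--     'good evening', 'greetings', 'howdy', 'hola', 'namaste',
--     'hi there', 'hello there'
-- ])
--
--
-- def is_greeting(question):
--     """Check if the question is a greeting"""
--     s = question.lower().strip()
--     n = len(s)
--     # try every cut point that ends the message or is followed by ' ' or ','
--     return any(s[:i] in GREETINGS for i in range(n + 1) if i == n or s[i] in ' ,')
-- ===== Notes on version B (the rewrite author's own statement) =====
-- stated objective: alternative
-- what changed: Instead of looping over the 12 greetings and running three startswith/== checks each, B scans the cut points of the lowered, stripped string (end of string or a position holding ' ' or ',') and tests the prefix up to each cut for membership in a precomputed frozenset of greetings.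
import Mathlib
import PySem

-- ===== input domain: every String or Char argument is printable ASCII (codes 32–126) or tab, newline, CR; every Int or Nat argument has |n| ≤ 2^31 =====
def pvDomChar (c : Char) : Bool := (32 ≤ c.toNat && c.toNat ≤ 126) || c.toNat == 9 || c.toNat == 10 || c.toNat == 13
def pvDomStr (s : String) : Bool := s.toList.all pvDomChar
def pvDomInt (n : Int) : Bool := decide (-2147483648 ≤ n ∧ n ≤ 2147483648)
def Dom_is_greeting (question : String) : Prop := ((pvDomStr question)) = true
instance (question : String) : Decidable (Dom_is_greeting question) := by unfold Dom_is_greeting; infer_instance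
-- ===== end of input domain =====

-- B replaces the 12-greeting loop with three startswith/== checks each by a scan over the
-- cut points of the lowered stripped string (end, or a ' '/',' position), testing the prefix
-- up to each cut against a precomputed set of greetings; same return value, alternative algorithm.

-- ===== PORT A =====
def greetingsA : List String :=
  ["hello", "hi", "hey", "good morning", "good afternoon",
   "good evening", "greetings", "howdy", "hola", "namaste",
   "hi there", "hello there"]

def is_greeting (question : String) : Bool :=
  let question_lower := PySem.Str.strip (PySem.Str.lower question)
  -- the for-loop with early 'return True' is List.any over the greetings
  greetingsA.any (fun greeting =>
    question_lower == greeting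
      || PySem.Str.startswith question_lower (greeting ++ " ")
      || PySem.Str.startswith question_lower (greeting ++ ","))

-- ===== PORT B =====
def greetingSetB : PySem.Set String :=
  PySem.Set.ofList
    ["hello", "hi", "hey", "good morning", "good afternoon",
     "good evening", "greetings", "howdy", "hola", "namaste",
     "hi there", "hello there"]

def is_greeting_alt (question : String) : Bool :=
  let s := PySem.Str.strip (PySem.Str.lower question)
  let n : Int := PySem.Str.len s
  -- any(s[:i] in GREETINGS for i in range(n+1) if i == n or s[i] in ' ,')
  (PySem.List.pyRange 0 (n + 1) 1).any (fun i =>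
    (i == n
      || (match PySem.Str.pyGet? s i with
          | some c => c == ' ' || c == ','    -- one-char 'c in " ,"'
          | none => false))
      && PySem.Set.contains greetingSetB (PySem.Str.slice s none (some i)))

-- ===== PRECONDITION & SPEC =====
def Spec_is_greeting (question : String) (out : Bool) : Prop := out = is_greeting_alt question
instance (question : String) (out : Bool) : Decidable (Spec_is_greeting question out) := by unfold Spec_is_greeting; infer_instance

-- ===== CLAIM (what is proved, stated in full; the proofs are below) =====
def Claim_equal_is_greeting : Prop := ∀ (question : String), Dom_is_greeting question → Spec_is_greeting question (is_greeting question)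

-- ===== LEMMAS AND PROOFS =====

-- a prefix 'gl ++ [c]' of l gives: the first gl.length chars are gl, the next char is c
lemma prefix_cut {l gl : List Char} {c : Char} (h : gl ++ [c] <+: l) :
    l.take gl.length = gl ∧ PySem.List.pyGet? l (gl.length : Int) = some c ∧
      gl.length < l.length := by
  obtain ⟨u, hu⟩ := h
  rw [List.append_assoc] at hu
  subst hu
  refine ⟨List.take_left, PySem.List.pyGet?_append_length gl u c, by simp⟩

-- conversely, 'first k chars = gl and char k is c' makes gl ++ [c] a prefix of l
lemma cut_prefix {l gl : List Char} {k : Nat} {c : Char} (h1 : l.take k = gl)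
    (h2 : l[k]? = some c) : gl ++ [c] <+: l := by
  have ht : l.take (k + 1) = gl ++ [c] := by
    rw [List.take_add_one, h1, h2]; rfl
  rw [← ht]; exact List.take_prefix (k + 1) l

-- the three A-side checks for one greeting g hold iff some admissible cut of s equals g
lemma cut_iff (s g : String) :
    (s == g || PySem.Str.startswith s (g ++ " ")
       || PySem.Str.startswith s (g ++ ",")) = true ↔
    ∃ i : Int, 0 ≤ i ∧ i < PySem.Str.len s + 1 ∧
      ((i == PySem.Str.len s
        || (match PySem.Str.pyGet? s i with
            | some c => c == ' ' || c == ','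
            | none => false)) = true) ∧
      PySem.Str.slice s none (some i) = g := by
  have hspace : (" " : String).toList = [' '] := by decide
  have hcomma : ("," : String).toList = [','] := by decide
  have hslice : ∀ k : Nat, (PySem.Str.slice s none (some (k : Int))).toList
      = s.toList.take k := by
    intro k
    simp [PySem.Str.toList_slice, PySem.List.slice_to_natCast]
  constructor
  · intro h
    rcases Bool.or_eq_true_iff.mp h with h' | hsw
    · rcases Bool.or_eq_true_iff.mp h' with heq | hsw
      · -- exact match: cut at the very end
        refine ⟨(s.toList.length : Int), by positivity, by simp [PySem.Str.len_eq], ?_, ?_⟩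
        · simp [PySem.Str.len_eq]
        · apply String.toList_inj.mp
          rw [hslice, List.take_length, (beq_iff_eq.mp heq)]
      · -- greeting followed by a space
        rw [PySem.Str.startswith_eq, PySem.Chars.startswith_iff, String.toList_append,
          hspace] at hsw
        obtain ⟨h1, h2, h3⟩ := prefix_cut hsw
        refine ⟨(g.toList.length : Int), by positivity,
          (by rw [PySem.Str.len_eq]; omega), ?_, ?_⟩
        · apply Bool.or_eq_true_iff.mpr; right
          rw [PySem.Str.pyGet?_eq, PySem.Chars.pyGet?_eq_listPyGet?, h2]
          rfl
        · exact String.toList_inj.mp (by rw [hslice, h1])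
    · -- greeting followed by a comma
      rw [PySem.Str.startswith_eq, PySem.Chars.startswith_iff, String.toList_append,
        hcomma] at hsw
      obtain ⟨h1, h2, h3⟩ := prefix_cut hsw
      refine ⟨(g.toList.length : Int), by positivity,
          (by rw [PySem.Str.len_eq]; omega), ?_, ?_⟩
      · apply Bool.or_eq_true_iff.mpr; right
        rw [PySem.Str.pyGet?_eq, PySem.Chars.pyGet?_eq_listPyGet?, h2]
        rfl
      · exact String.toList_inj.mp (by rw [hslice, h1])
  · rintro ⟨i, h0, h1, hterm, hsl⟩
    have hk : i = ((i.toNat : Nat) : Int) := (Int.toNat_of_nonneg h0).symm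
    have hgl : s.toList.take i.toNat = g.toList := by
      rw [← hslice, ← hk, hsl]
    rcases Bool.or_eq_true_iff.mp hterm with hend | hc
    · -- cut at the end: s = g
      apply Bool.or_eq_true_iff.mpr; left; apply Bool.or_eq_true_iff.mpr; left
      have : i = (s.toList.length : Int) := by
        have := beq_iff_eq.mp hend; rw [PySem.Str.len_eq] at this; omega
      apply beq_iff_eq.mpr; apply String.toList_inj.mp
      rw [← hgl, this]; simp
    · -- cut at a ' ' or ',' character
      rcases hget : PySem.Str.pyGet? s i with _ | c
      · rw [hget] at hc; simp at hc
      · rw [hget] at hc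
        have hidx : s.toList[i.toNat]? = some c := by
          rw [PySem.Str.pyGet?_eq, PySem.Chars.pyGet?_eq_listPyGet?,
            PySem.List.pyGet?_of_nonneg _ h0] at hget
          exact hget
        have hpre : g.toList ++ [c] <+: s.toList := cut_prefix hgl hidx
        rcases Bool.or_eq_true_iff.mp hc with hc' | hc'
        · apply Bool.or_eq_true_iff.mpr; left; apply Bool.or_eq_true_iff.mpr; right
          rw [PySem.Str.startswith_eq, PySem.Chars.startswith_iff, String.toList_append,
            hspace, ← beq_iff_eq.mp hc']
          exact hpre
        · apply Bool.or_eq_true_iff.mpr; right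
          rw [PySem.Str.startswith_eq, PySem.Chars.startswith_iff, String.toList_append,
            hcomma, ← beq_iff_eq.mp hc']
          exact hpre

-- ===== VERDICT (by name: the statement is the Claim_ definition above) =====
theorem is_greeting_spec : Claim_equal_is_greeting := by
  intro question _
  unfold Spec_is_greeting is_greeting is_greeting_alt
  set s := PySem.Str.strip (PySem.Str.lower question) with hs
  rw [Bool.eq_iff_iff]
  simp only [List.any_eq_true]
  constructor
  · rintro ⟨g, hg, hcond⟩
    obtain ⟨i, h0, h1, hterm, hsl⟩ := (cut_iff s g).mp hcond
    refine ⟨i, PySem.List.mem_pyRange_one.mpr ⟨h0, h1⟩, ?_⟩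
    apply Bool.and_eq_true_iff.mpr
    refine ⟨hterm, ?_⟩
    rw [hsl]
    exact (PySem.Set.contains_iff _ _).mpr ((PySem.Set.mem_ofList _ _).mpr hg)
  · rintro ⟨i, hi, hcond⟩
    obtain ⟨hterm, hmem⟩ := Bool.and_eq_true_iff.mp hcond
    obtain ⟨h0, h1⟩ := PySem.List.mem_pyRange_one.mp hi
    have hg := (PySem.Set.mem_ofList _ _).mp ((PySem.Set.contains_iff _ _).mp hmem)
    exact ⟨_, hg, (cut_iff s _).mpr ⟨i, h0, h1, hterm, rfl⟩⟩
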